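-- pv_equiv track=rewrite | github.com/pm012/PySandbox | Courses/CISCO/Python2/Module2/cipher_with_fibonnaci_key.py | encode_with_key
-- ===== SOURCE A (Python) =====
-- def fibonacci(n):
--     """Return the n-th Fibonacci number."""
--     a, b = 0, 1
--     for _ in range(n):
--         a, b = b, a + b
--     return a
--
-- def key_to_offset(secret_key):
--     """Convert secret key to a numeric offset."""
--     return sum(ord(c) for c in secret_key) % 50  # Keep offset reasonable
--
-- def encode_with_key(text, key):
--     offset = key_to_offset(key)
--     encoded_str = ""
--     for i, char in enumerate(text):
--         fib = fibonacci(i + 1 + offset)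
--         encoded_value = ord(char) + fib
--         hex_repr = f"{encoded_value:04x}"
--         encoded_str += hex_repr
--     return encoded_str
--
-- text = "SecretMessage123"
--
-- key = "MySuperSecretKey"
-- ===== SOURCE B (Python) =====
-- def encode_with_key(text, key):
--     offset = sum(ord(c) for c in key) % 50
--     # rolling Fibonacci pair: after the warm-up loop, a = fib(offset+1), b = fib(offset+2)
--     a, b = 0, 1
--     for _ in range(offset + 1):
--         a, b = b, a + b
--     parts = []
--     for ch in text:
--         parts.append(f"{ord(ch) + a:04x}")
--         a, b = b, a + b
--     return "".join(parts)
-- ===== Notes on version B (the rewrite author's own statement) =====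
-- stated objective: faster
-- what changed: B replaces A's per-character from-scratch Fibonacci loop fibonacci(i+1+offset) with a single rolling Fibonacci pair advanced once per character (and joins collected hex chunks instead of repeated string concatenation).
import Mathlib
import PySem

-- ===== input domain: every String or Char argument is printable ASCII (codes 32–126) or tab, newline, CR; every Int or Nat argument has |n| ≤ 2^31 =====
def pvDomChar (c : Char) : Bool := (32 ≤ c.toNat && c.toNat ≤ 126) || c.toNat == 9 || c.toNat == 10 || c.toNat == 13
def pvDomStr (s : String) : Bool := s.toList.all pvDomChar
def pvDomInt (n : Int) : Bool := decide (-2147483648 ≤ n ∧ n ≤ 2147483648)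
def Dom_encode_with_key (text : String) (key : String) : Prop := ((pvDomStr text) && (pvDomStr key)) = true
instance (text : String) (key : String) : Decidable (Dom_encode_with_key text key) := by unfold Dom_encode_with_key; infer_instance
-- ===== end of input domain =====

-- B replaces A's per-character recomputation of fibonacci(i+1+offset) by one rolling
-- Fibonacci pair advanced once per character (O(n) Fibonacci steps instead of O(n^2)).

-- shared formatting helper: f"{v:04x}" for v ≥ 0 (hex digits, zero-padded to width 4); exact for nonnegative ints
def pvHexDigit (n : Nat) : Char := if n < 10 then Char.ofNat (48 + n) else Char.ofNat (87 + n)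

def pvHexChars (n : Nat) : List Char :=
  if h : n < 16 then [pvHexDigit n]
  else pvHexChars (n / 16) ++ [pvHexDigit (n % 16)]
decreasing_by exact Nat.div_lt_self (by omega) (by omega)

def pvHex4 (n : Nat) : List Char := PySem.Chars.zfill (pvHexChars n) 4

-- ===== PORT A =====
-- all integer values here are nonnegative (ords, sums, Fibonacci numbers), so Nat is exact;
-- enumerate's indices are nonnegative, so .toNat on i+1+offset is exact
def pvFibonacci (n : Nat) : Nat :=
  ((List.range n).foldl (fun (ab : Nat × Nat) _ => (ab.2, ab.1 + ab.2)) (0, 1)).1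

def pvKeyToOffset (secret_key : String) : Nat :=
  (secret_key.toList.foldl (fun s c => s + c.toNat) 0) % 50

def encode_with_key (text : String) (key : String) : String :=
  let offset := pvKeyToOffset key
  String.mk ((PySem.List.enumerate text.toList).foldl
    (fun (acc : List Char) (p : Int × Char) =>
      acc ++ pvHex4 (p.2.toNat + pvFibonacci (p.1 + 1 + (offset : Int)).toNat)) [])

-- ===== PORT B =====
def encode_with_key_alt (text : String) (key : String) : String :=
  let offset := (key.toList.foldl (fun s c => s + c.toNat) 0) % 50
  let ab := (List.range (offset + 1)).foldl
      (fun (ab : Nat × Nat) _ => (ab.2, ab.1 + ab.2)) (0, 1)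
  let st := text.toList.foldl
      (fun (st : (Nat × Nat) × List (List Char)) ch =>
        ((st.1.2, st.1.1 + st.1.2), st.2 ++ [pvHex4 (ch.toNat + st.1.1)])) (ab, [])
  String.mk (PySem.Chars.join [] st.2)

-- ===== PRECONDITION & SPEC =====
def Spec_encode_with_key (text : String) (key : String) (out : String) : Prop := out = encode_with_key_alt text key
instance (text : String) (key : String) (out : String) : Decidable (Spec_encode_with_key text key out) := by unfold Spec_encode_with_key; infer_instance

-- ===== CLAIM (what is proved, stated in full; the proofs are below) =====
def Claim_equal_encode_with_key : Prop := ∀ (text : String) (key : String), Dom_encode_with_key text key → Spec_encode_with_key text key (encode_with_key text key)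

-- ===== LEMMAS AND PROOFS =====

def fibPair (n : Nat) : Nat × Nat :=
  (List.range n).foldl (fun (ab : Nat × Nat) _ => (ab.2, ab.1 + ab.2)) (0, 1)

lemma fibPair_succ (n : Nat) :
    fibPair (n + 1) = ((fibPair n).2, (fibPair n).1 + (fibPair n).2) := by
  simp [fibPair, List.range_succ]

lemma pvFibonacci_eq (n : Nat) : pvFibonacci n = (fibPair n).1 := rfl

def chunksSpec : List Char → Nat → List (List Char)
  | [], _ => []
  | c :: cs, k => pvHex4 (c.toNat + (fibPair k).1) :: chunksSpec cs (k + 1)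

lemma sideA (l : List Char) (offset : Nat) :
    ∀ (s : Nat) (acc : List Char),
    (PySem.List.enumerate l (s : Int)).foldl
      (fun (acc : List Char) (p : Int × Char) =>
        acc ++ pvHex4 (p.2.toNat + pvFibonacci (p.1 + 1 + (offset : Int)).toNat)) acc
      = acc ++ (chunksSpec l (s + 1 + offset)).flatten := by
  induction l with
  | nil => intro s acc; simp [PySem.List.enumerate_nil, chunksSpec]
  | cons c cs ih =>
    intro s acc
    have hcast : (((s + 1 : Nat) : Int) + (offset : Int)).toNat = s + 1 + offset := by
      push_cast; omega
    have hstep : ((s : Int) + 1) = ((s + 1 : Nat) : Int) := by push_cast; ring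
    simp only [PySem.List.enumerate_cons, List.foldl_cons]
    rw [hstep, ih (s + 1)]
    have harith : s + 1 + 1 + offset = s + 1 + offset + 1 := by omega
    simp only [hcast, harith, pvFibonacci_eq, chunksSpec, List.flatten_cons, List.append_assoc]

lemma sideB (l : List Char) :
    ∀ (k : Nat) (acc : List (List Char)),
    l.foldl
      (fun (st : (Nat × Nat) × List (List Char)) ch =>
        ((st.1.2, st.1.1 + st.1.2), st.2 ++ [pvHex4 (ch.toNat + st.1.1)])) (fibPair k, acc)
      = (fibPair (k + l.length), acc ++ chunksSpec l k) := by
  induction l with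
  | nil => intro k acc; simp [chunksSpec]
  | cons c cs ih =>
    intro k acc
    simp only [List.foldl_cons]
    have h1 : ((fibPair k).2, (fibPair k).1 + (fibPair k).2) = fibPair (k + 1) :=
      (fibPair_succ k).symm
    rw [h1, ih]
    simp [chunksSpec, List.length_cons]
    congr 1
    omega

lemma join_nil_sep (ps : List (List Char)) : PySem.Chars.join [] ps = ps.flatten := by
  induction ps with
  | nil => simp [PySem.Chars.join_nil]
  | cons p q ih =>
    cases q with
    | nil => simp [PySem.Chars.join_singleton]
    | cons r rs =>
      rw [PySem.Chars.join_cons_cons, ih]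
      simp

-- ===== VERDICT (by name: the statement is the Claim_ definition above) =====
theorem encode_with_key_spec : Claim_equal_encode_with_key := by
  intro text key _
  unfold Spec_encode_with_key encode_with_key encode_with_key_alt
  have hoff : pvKeyToOffset key = (key.toList.foldl (fun s c => s + c.toNat) 0) % 50 := rfl
  simp only [hoff]
  set offset := (key.toList.foldl (fun s c => s + c.toNat) 0) % 50 with hdef
  have hA := sideA text.toList offset 0 []
  have hB := sideB text.toList (offset + 1) []
  have hab : (List.range (offset + 1)).foldl
      (fun (ab : Nat × Nat) _ => (ab.2, ab.1 + ab.2)) (0, 1) = fibPair (offset + 1) := rfl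
  simp only [Nat.cast_zero, Nat.zero_add, List.nil_append] at hA
  simp only [List.nil_append] at hB
  simp only [hab]
  rw [hB]
  rw [hA, join_nil_sep]
  simp [Nat.add_comm]
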